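-- pv_equiv track=rewrite | github.com/E-delweiss/Cul_de_Chouette | CDC_code/CDC_regles.py | artichette
-- ===== SOURCE A (Python) =====
-- from itertools import permutations
--
-- def artichette(dico_dice):
--     """
--     Déterminer si la règle de "L'Artichette" est applicable.
--
--     input : dictionnaire contenant le nom des dés et leur valeur
--     output : True /False
--
--
--     Parameters
--     ----------
--     dico_dice : dict
--         Dictionnaire contenant le nom des dés et leur valeur.
--
--     Returns
--     -------
--     state : bool
--         Indique si la combinaison a lieu ou non.
--
--     """
--     chouette_1 = dico_dice['chouette_1']
--     chouette_2 = dico_dice['chouette_2']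
--     cul        = dico_dice['cul']
--
--     tuple_dice = (chouette_1,chouette_2,cul)
--     liste_comb = []
--     ARTICHETTE = [4,3,4]
--     for i in permutations(ARTICHETTE,3):
--         liste_comb.append(i)
--
--     if tuple_dice in liste_comb:
--         return True
--     else:
--         return False
-- ===== SOURCE B (Python) =====
-- def artichette(dico_dice):
--     chouette_1 = dico_dice['chouette_1']
--     chouette_2 = dico_dice['chouette_2']
--     cul        = dico_dice['cul']
--     return sorted((chouette_1, chouette_2, cul)) == [3, 4, 4]
-- ===== Notes on version B (the rewrite author's own statement) =====
-- stated objective: simpler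
-- what changed: B sorts the three dice and compares the result with the canonical form [3,4,4] once, instead of building the list of all 6 permutations of [4,3,4] and scanning it for the dice tuple.
import Mathlib
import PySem

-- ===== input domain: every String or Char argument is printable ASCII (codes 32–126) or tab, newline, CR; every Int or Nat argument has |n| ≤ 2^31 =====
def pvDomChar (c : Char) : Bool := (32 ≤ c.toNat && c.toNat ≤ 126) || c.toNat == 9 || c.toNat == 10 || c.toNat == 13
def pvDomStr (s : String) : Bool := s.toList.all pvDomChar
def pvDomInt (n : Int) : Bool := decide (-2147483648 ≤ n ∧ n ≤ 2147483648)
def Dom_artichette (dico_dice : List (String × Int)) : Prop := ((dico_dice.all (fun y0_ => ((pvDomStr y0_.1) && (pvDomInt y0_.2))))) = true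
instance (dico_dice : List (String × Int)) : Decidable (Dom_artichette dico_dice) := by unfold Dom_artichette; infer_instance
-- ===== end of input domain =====

-- B replaces A's permutation-list build-and-scan with one sort of the three dice compared to [3,4,4] (simpler, same behaviour).


-- ===== PORT A =====
-- A: look up the three dice (first match = Python dict lookup), build the list of all
-- permutations of ARTICHETTE = [4,3,4] by appending in a loop, and test membership.
def artichette (dico_dice : List (String × Int)) : Bool :=
  match (PySem.Dict.mk dico_dice).get? "chouette_1",
        (PySem.Dict.mk dico_dice).get? "chouette_2",
        (PySem.Dict.mk dico_dice).get? "cul" with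
  | some chouette_1, some chouette_2, some cul =>
    let tuple_dice : List Int := [chouette_1, chouette_2, cul]
    let ARTICHETTE : List Int := [4, 3, 4]
    let liste_comb : List (List Int) :=
      (PySem.List.permutations ARTICHETTE 3).foldl (fun acc i => acc ++ [i]) []
    if tuple_dice ∈ liste_comb then true else false
  | _, _, _ => false  -- unreachable under Pre_ (Python raises KeyError)

-- ===== PORT B =====
-- B: sort the three dice and compare with the canonical multiset form [3,4,4].
def artichette_alt (dico_dice : List (String × Int)) : Bool :=
  match (PySem.Dict.mk dico_dice).get? "chouette_1" with
  | none => false  -- unreachable under Pre_ (Python raises KeyError)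
  | some chouette_1 =>
    match (PySem.Dict.mk dico_dice).get? "chouette_2" with
    | none => false  -- unreachable under Pre_ (Python raises KeyError)
    | some chouette_2 =>
      match (PySem.Dict.mk dico_dice).get? "cul" with
      | none => false  -- unreachable under Pre_ (Python raises KeyError)
      | some cul =>
        decide (PySem.List.sorted [chouette_1, chouette_2, cul] (fun x => x) false = [3, 4, 4])

-- ===== PRECONDITION & SPEC =====
-- Pre_: the three keys A reads must be present, else Python raises KeyError.
def Pre_artichette (dico_dice : List (String × Int)) : Prop :=
  ((PySem.Dict.mk dico_dice).get? "chouette_1").isSome = true ∧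
  ((PySem.Dict.mk dico_dice).get? "chouette_2").isSome = true ∧
  ((PySem.Dict.mk dico_dice).get? "cul").isSome = true
instance (dico_dice : List (String × Int)) : Decidable (Pre_artichette dico_dice) := by unfold Pre_artichette; infer_instance
def pvWitness_artichette : (List (String × Int)) := [("chouette_1", 4), ("chouette_2", 3), ("cul", 4)]
def Spec_artichette (dico_dice : List (String × Int)) (out : Bool) : Prop := out = artichette_alt dico_dice
instance (dico_dice : List (String × Int)) (out : Bool) : Decidable (Spec_artichette dico_dice out) := by unfold Spec_artichette; infer_instance

-- ===== CLAIM (what is proved, stated in full; the proofs are below) =====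
def Claim_equal_artichette : Prop := ∀ (dico_dice : List (String × Int)), Dom_artichette dico_dice → Pre_artichette dico_dice → Spec_artichette dico_dice (artichette dico_dice)

-- ===== LEMMAS AND PROOFS =====
lemma artichette_comb_lit :
    ((PySem.List.permutations [(4:Int),3,4] 3).foldl (fun acc i => acc ++ [i]) []) =
      [[4,3,4],[4,4,3],[3,4,4],[3,4,4],[4,4,3],[4,3,4]] := by decide

lemma artichette_mem_iff_sorted (a b c : Int) :
    ([a,b,c] ∈ ([[4,3,4],[4,4,3],[3,4,4],[3,4,4],[4,4,3],[4,3,4]] : List (List Int)))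
      ↔ PySem.List.sorted [a,b,c] (fun x => x) false = [3,4,4] := by
  simp only [PySem.List.sorted_eq_foldl_insertBy, PySem.List.insertBy, List.foldl,
    List.mem_cons, List.cons.injEq, List.not_mem_nil, or_false]
  split_ifs <;> simp only [PySem.List.insertBy] <;> split_ifs <;> simp_all <;> omega

-- ===== VERDICT (by name: the statement is the Claim_ definition above) =====
theorem artichette_spec : Claim_equal_artichette := by
  intro d _ hpre
  obtain ⟨h1, h2, h3⟩ := hpre
  unfold Spec_artichette artichette artichette_alt
  rcases e1 : (PySem.Dict.mk d).get? "chouette_1" with _ | c1 <;> rw [e1] at h1 ; try simp at h1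
  rcases e2 : (PySem.Dict.mk d).get? "chouette_2" with _ | c2 <;> rw [e2] at h2 ; try simp at h2
  rcases e3 : (PySem.Dict.mk d).get? "cul" with _ | c3 <;> rw [e3] at h3 ; try simp at h3
  simp only [artichette_comb_lit]
  by_cases hm : ([c1,c2,c3] ∈ ([[4,3,4],[4,4,3],[3,4,4],[3,4,4],[4,4,3],[4,3,4]] : List (List Int)))
  · simp only [if_pos hm, (artichette_mem_iff_sorted c1 c2 c3).mp hm, decide_true]
  · rw [if_neg hm]
    have : ¬ PySem.List.sorted [c1,c2,c3] (fun x => x) false = [3,4,4] :=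
      fun hs => hm ((artichette_mem_iff_sorted c1 c2 c3).mpr hs)
    simp [this]
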